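/- GENERATED by tools/from_farm_form.py from prooffarm-gif/accepted/gif_decode.3/Lemmas.lean (a worked proof of the farm's unit `gif_decode.3`,
   accepted by the verdict) — do not edit. -/
import Gif.Spec.Units.gif_decode_3
import Gif.Spec.AllSegs

/-!
  Lemmas for the unit `gif_decode.3` (a body segment of the driver's protected function, behind a successful DGifOpen): the call of
  DGifSlurp, then eleven checked accesses (the report's fields, four scalar fields of gif).

      gd3_seg_call     0x10aedd … `call DGifSlurp` … 0x10aee8 (`ret15`): `Held ret15` for the heap and the forest of DGifSlurp's post
      gd3_seg_result   0x10aee8 … the two checked stores of `slurp_result`, `exit_code` (either arm) … 0x10af14 (`chk16`)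
      gd3_seg_fields   0x10af14 … the four checked loads inside gif, each stored (checked) into the report … 0x10af77
-/

open X86 X86.User Asan ProgX.Base ProgX.Base.Spec Gif.Spec

set_option maxRecDepth 4000
set_option maxHeartbeats 4000000

namespace Gif.Spec.gif_decode_3

/-- **10AEDDH … the call of DGifSlurp … 10AEE8H (ret15)** (gif_driver.c:203-209): `rbp = gif`, `rdi = gif`. DGifSlurp's `Env`: `HeapPre`
by `HeapPre.at_call` (one stack window: the pushed return address), `Ctx` by `gif_decode.ctx`, `GifOK` through the same window
(`Loose.stack`: below the cursor). Behind the call `Core` by `Core.carry`; the heap `H'` and the forest `F'` are the post's. -/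
theorem gd3_seg_call (Lay : Layout) (hLay : Lay.hi = 0x1000000) (μ : Microarch) (hμ : UserX.MicroOK μ) (u₀ : State)
    (hcode : HasCodeNat Lay u₀ Gif.L.gif_decode.entry Gif.Code.code_gif_decode.nat Gif.L.gif_decode.size)
    (H : Heap) (rest : List Obj) (frames : List (Nat × FrameLayout)) (Hc : Heap) (Fc : Forest) (e : State) (ret : Word)
    (h_DGifSlurp : Calls Lay μ ProgX.Base.WayInv (ProgX.Base.conv u₀) Gif.L.DGifSlurp.entry
      (Gif.Spec.DGifSlurp.spec Hc rest (gif_decode.framesIn frames e) Fc (gif_decode.reader e)))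
    (v : State) (hat : gif_decode.AfterOpen H rest frames Hc Fc u₀ e ret v) :
    ReachVia Lay μ ProgX.Base.WayInv v (fun w =>
      ∃ (H' : Heap) (F' : Forest), gif_decode.Held Gif.L.gif_decode.ret15 H rest frames H' F' u₀ e ret w) := by
  -- 1. THE PRELUDE OF A HEAP-LEVEL BODY SEGMENT: `Core` stays whole
  obtain ⟨⟨hcore, hreg, hinv, hok, hcomp⟩, hrax⟩ := hat
  have he := hcore.entry
  v_entry he
  have hpre := hcore.pre
  obtain ⟨hheap, hglob, hconsts0, hin, hrep, hrep_lo, hrep_hi⟩ := hcore.pre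
  have w_rip := hcore.rip
  have c_rsp : v.reg .rsp = e.reg .rsp - 136 := hcore.rsp
  have w_kept : RegsKept [.rsp] v v := RegsKept.refl _ _
  have w_eq : Mem.EqOn ProgX.Base.L.textLo ProgX.Base.L.textHi u₀.mem v.mem := ProgX.Base.conv_code_eqOn hcore.code
  have hdf := (show abiInv _ from hcore.abi).1
  have hmx := (show abiInv _ from hcore.abi).2
  have hsse := ProgX.Base.sseOK_of_abiInv hcore.abi
  have hrab := gif_decode.report_above hpre
  -- 2. THE WALK, to the call's return address (a private cut)
  u_walk hcode [hμ.vendor] until [Gif.L.gif_decode.ret15] span [ProgX.Base.L.textLo, ProgX.Base.L.textHi] side (v_side)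
  case call_inv =>
    v_inv
  case pre_10aee3 =>
    -- 3. DGIFSLURP'S PRECONDITION. One stack store since `v`: the pushed return address (RA − 144)
    have hctx : Ctx rest (gif_decode.framesIn frames e) (gif_decode.reader e) := gif_decode.ctx hpre (by omega)
    have hs : Mem.SameExcept [⟨(e.reg .rsp).toNat - 992, (e.reg .rsp).toNat - 136⟩] v.mem s_10aee3.mem := by
      rw [w_mem]
      u_same
    have hpre' : HeapPre Hc rest (gif_decode.framesIn frames e) s_10aee3 := by
      refine HeapPre.at_call hheap hreg hinv hs (by omega) ?_ ?_ ?_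
      · rw [w_rsp]
        u_omega
      · rw [w_rsp]
        u_omega
      · rw [w_rsp]
        u_omega
    have hcur : 0x700000 ≤ (gif_decode.reader e).cur ∧ (gif_decode.reader e).cur + 16 ≤ 0x800000 := by
      show 0x700000 ≤ (e.reg .rsp).toNat - 72 ∧ (e.reg .rsp).toNat - 72 + 16 ≤ 0x800000
      omega
    have hok' : GifOK Hc Fc (gif_decode.reader e) s_10aee3.mem := by
      apply hok.sameExcept hinv.heap hcur hs
      intro w hw
      have hw_eq := List.mem_singleton.mp hw
      rw [hw_eq]
      refine Loose.stack hinv.heap ?_ ?_ ?_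
      · simp only
        omega
      · simp only
        omega
      · show (e.reg .rsp).toNat - 136 ≤ (e.reg .rsp).toNat - 72
        omega
    refine ⟨⟨hpre', hctx, hok'⟩, ?_, hcomp⟩
    rw [w_rdi]
    exact hrax
  -- 4. 0x10aee8 (ret15): DGIFSLURP HAS RETURNED, with A heap `H'` and A forest `F'`
  obtain ⟨H', F', hb, hgif, hpv, hcomp'⟩ := w_post
  have hinv1 := hb.inv
  have e_top : (s_10aee3.reg .rsp).toNat + 8 = (e.reg .rsp).toNat - 136 := by
    rw [w_rsp_10aee3]
    u_omega
  rw [e_top] at hinv1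
  v_after_call w_rsp_10aee3 w_mem_10aee3
  -- the footprint since `v`: the pushed return address, DGifSlurp's stack, `cursor.cur` (RA − 72): all below RA − 56; the heap's
  -- region and shadow
  have hsame1 : Mem.SameExcept
      [⟨(e.reg .rsp).toNat - 992, (e.reg .rsp).toNat - 56⟩,
       ⟨0x800000, 0x1000020⟩] v.mem s_10aee3r.mem := by u_same
  have hwin1 : ∀ x, x ∈ ([⟨(e.reg .rsp).toNat - 992, (e.reg .rsp).toNat - 56⟩, ⟨0x800000, 0x1000020⟩] : List Span) →
      gif_decode.BodyWin e x := by
    intro x hx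
    simp only [List.mem_cons, List.mem_nil_iff, or_false] at hx
    unfold gif_decode.BodyWin
    rcases hx with rfl | rfl
    · left
      simp only
      omega
    · right
      left
      simp only
      omega
  -- `Core` at the returned state
  have hcore1 := hcore.carry (cut' := Gif.L.gif_decode.ret15) w_rip w_rsp (w_kept.get .r12 rfl) (w_kept.get .r13 rfl)
    (w_kept.get .rbx rfl) (w_kept.get .r15 rfl) hsame1 hwin1 w_code w_inv
  refine ReachVia.done ⟨H', F', ?_⟩
  exact {
    open_ := {
      core := hcore1
      region := hreg.trans hb.region
      inv := hinv1
      ok := hb.ok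
      complete := hcomp'
    }
    rbp := by
      rw [w_rbp, hgif]
      exact hrax
  }

/-- **`Held` AT A LATER STATE OF THE SEGMENT, BEHIND DGifSlurp**: the heap and the forest are the same; the memory changed only in the
function's stack below the body's `rsp` (the return addresses of the check calls) and in the report (a caller's stack object, at or
above RA + 8). `Core` by `Core.carry`, `HeapInv` by `HeapInv.stack_windows`, `GifOK` by `GifOK.sameExcept` (`Loose.stack` below the
cursor, `Loose.offHeap` for the report). Used at every exit of the two walks behind the call. -/
theorem gd3_held_carry {cut cut' : Word} {H : Heap} {rest : List Obj} {frames : List (Nat × FrameLayout)} {Hc : Heap} {Fc : Forest}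
    {u₀ e : State} {ret : Word} {v s : State}
    (hh : gif_decode.Held cut H rest frames Hc Fc u₀ e ret v)
    (hrip : s.rip = cut') (hrsp : s.reg .rsp = e.reg .rsp - 136)
    (hr12 : s.reg .r12 = v.reg .r12) (hr13 : s.reg .r13 = v.reg .r13) (hrbx : s.reg .rbx = v.reg .rbx)
    (hr15 : s.reg .r15 = v.reg .r15) (hrbp : s.reg .rbp = v.reg .rbp)
    (hs : Mem.SameExcept
      [⟨(e.reg .rsp).toNat - 992, (e.reg .rsp).toNat - 136⟩,
       ⟨(e.reg .rdx).toNat, (e.reg .rdx).toNat + 64⟩] v.mem s.mem)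
    (hcode : (conv u₀).code.In s.mem) (habi : (conv u₀).inv s) :
    gif_decode.Held cut' H rest frames Hc Fc u₀ e ret s := by
  obtain ⟨⟨hcore, hreg, hinv, hok, hcomp⟩, hrbp0⟩ := hh
  have he_room := hcore.entry.room
  have he_top := hcore.entry.top
  simp only [vspec, ProgX.conv_stackLo, ProgX.conv_stackHi] at he_room he_top
  have hpre := hcore.pre
  obtain ⟨hheap, _, _, _, _, hrep_lo, hrep_hi⟩ := hcore.pre
  have hrab := gif_decode.report_above hpre
  have hbase' : Hc.base = 0x800000 := hreg.1.trans hheap.base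
  -- both windows lie in the stack region: the heap's invariant holds on
  have hoff : ∀ w, w ∈ ([⟨(e.reg .rsp).toNat - 992, (e.reg .rsp).toNat - 136⟩,
      ⟨(e.reg .rdx).toNat, (e.reg .rdx).toNat + 64⟩] : List Span) → 0x700000 ≤ w.lo ∧ w.hi ≤ 0x800000 := by
    intro w hw
    simp only [List.mem_cons, List.mem_nil_iff, or_false] at hw
    rcases hw with rfl | rfl
    · simp only
      omega
    · exact ⟨hrep_lo, hrep_hi⟩
  obtain ⟨hinv1, _⟩ := hinv.stack_windows hbase' hs hoff
  -- both windows are the body's: `Core` holds on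
  have hwin : ∀ x, x ∈ ([⟨(e.reg .rsp).toNat - 992, (e.reg .rsp).toNat - 136⟩,
      ⟨(e.reg .rdx).toNat, (e.reg .rdx).toNat + 64⟩] : List Span) → gif_decode.BodyWin e x := by
    intro x hx
    simp only [List.mem_cons, List.mem_nil_iff, or_false] at hx
    unfold gif_decode.BodyWin
    rcases hx with rfl | rfl
    · left
      simp only
      omega
    · right
      right
      simp only
      omega
  have hcore' := hcore.carry (cut' := cut') hrip hrsp hr12 hr13 hrbx hr15 hs hwin hcode habi
  -- both windows are loose: the state invariant holds on
  have hcur : 0x700000 ≤ (gif_decode.reader e).cur ∧ (gif_decode.reader e).cur + 16 ≤ 0x800000 := by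
    show 0x700000 ≤ (e.reg .rsp).toNat - 72 ∧ (e.reg .rsp).toNat - 72 + 16 ≤ 0x800000
    omega
  have hloose : ∀ w, w ∈ ([⟨(e.reg .rsp).toNat - 992, (e.reg .rsp).toNat - 136⟩,
      ⟨(e.reg .rdx).toNat, (e.reg .rdx).toNat + 64⟩] : List Span) → Loose Hc Fc (gif_decode.reader e) w := by
    intro w hw
    simp only [List.mem_cons, List.mem_nil_iff, or_false] at hw
    rcases hw with rfl | rfl
    · refine Loose.stack hinv.heap ?_ ?_ ?_
      · simp only
        omega
      · simp only
        omega
      · show (e.reg .rsp).toNat - 136 ≤ (e.reg .rsp).toNat - 72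
        omega
    · refine Loose.offHeap hinv.heap ?_ ?_ ?_
      · left
        rw [hbase']
        exact hrep_hi
      · right
        show (e.reg .rsp).toNat - 72 + 16 ≤ (e.reg .rdx).toNat
        omega
      · right
        show 0x14139a ≤ (e.reg .rdx).toNat
        omega
  have hok' : GifOK Hc Fc (gif_decode.reader e) s.mem := hok.sameExcept hinv.heap hcur hs hloose
  refine ⟨⟨hcore', hreg, hinv1, hok', hcomp⟩, ?_⟩
  rw [hrbp]
  exact hrbp0

/-- **At 10AF14H (chk16: `call __asan_load4_noabort` of `gif->Error`)**, where the two arms of `if (slurp_result == GIF_OK)` meet: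
`Held` (the heap and the forest are DGifSlurp's), and `rdi = gif + 96` (`lea rdi, [rbp+0x60]`). -/
structure gd3_AtChk16 (H : Heap) (rest : List Obj) (frames : List (Nat × FrameLayout)) (Hc : Heap) (Fc : Forest)
    (u₀ e : State) (ret : Word) (v : State) : Prop where
  held : gif_decode.Held Gif.L.gif_decode.chk16 H rest frames Hc Fc u₀ e ret v
  /-- `lea rdi, [rbp+0x60]` (10AF10H): `&gif->Error` -/
  rdi : v.reg .rdi = v.reg .rbp + 0x60

/-- **10AEE8H (ret15) … 10AF14H (chk16)** (gif_driver.c:209-215): `r14d = eax`, the checked store `report->slurp_result`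
(`report + 8`); `cmp r14d, 1`; either arm the checked store `report->exit_code` (`report + 0`; 10AF02H: 2, 10B027H: 0);
`rdi = &gif->Error`. Both checks: `gif_decode.reportLive` for the heap `Hc`. -/
theorem gd3_seg_result (Lay : Layout) (hLay : Lay.hi = 0x1000000) (μ : Microarch) (hμ : UserX.MicroOK μ) (u₀ : State)
    (hcode : HasCodeNat Lay u₀ Gif.L.gif_decode.entry Gif.Code.code_gif_decode.nat Gif.L.gif_decode.size)
    (H : Heap) (rest : List Obj) (frames : List (Nat × FrameLayout)) (Hc : Heap) (Fc : Forest) (e : State) (ret : Word)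
    (h_asan_store4_noabort : Asan.SmallCheck Lay μ ProgX.Base.WayInv (ProgX.Base.CodeOK u₀) [.rax, .rcx, .rdx] 4
      ProgX.Base.L.__asan_store4_noabort.entry)
    (v : State) (hat : gif_decode.Held Gif.L.gif_decode.ret15 H rest frames Hc Fc u₀ e ret v) :
    ReachVia Lay μ ProgX.Base.WayInv v (gd3_AtChk16 H rest frames Hc Fc u₀ e ret) := by
  -- 1. THE PRELUDE
  have hcore := hat.open_.core
  have hinv := hat.open_.inv
  have he := hcore.entry
  v_entry he
  have hpre := hcore.pre
  obtain ⟨hheap, hglob, hconsts0, hin, hrep, hrep_lo, hrep_hi⟩ := hcore.pre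
  have w_rip := hcore.rip
  have c_rsp : v.reg .rsp = e.reg .rsp - 136 := hcore.rsp
  have c_rbx : v.reg .rbx = e.reg .rdx := hcore.rbx
  -- the tested register as a VARIABLE
  obtain ⟨z, c_rax⟩ : ∃ z, v.reg .rax = z := ⟨_, rfl⟩
  have w_kept : RegsKept [.rsp] v v := RegsKept.refl _ _
  have w_eq : Mem.EqOn ProgX.Base.L.textLo ProgX.Base.L.textHi u₀.mem v.mem := ProgX.Base.conv_code_eqOn hcore.code
  have hdf := (show abiInv _ from hcore.abi).1
  have hmx := (show abiInv _ from hcore.abi).2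
  have hsse := ProgX.Base.sseOK_of_abiInv hcore.abi
  have hrab := gif_decode.report_above hpre
  have hrl : LiveIn (Hc.liveObjs ++ rest) (gif_decode.framesIn frames e) (e.reg .rdx).toNat 64 :=
    gif_decode.reportLive hpre Hc _ _ _ (Nat.le_refl _) (Nat.le_refl _)
  -- 2. THE WALK, both arms, to the call of the first load check
  u_walk hcode [hμ.vendor] until [Gif.L.gif_decode.chk16] span [ProgX.Base.L.textLo, ProgX.Base.L.textHi] side (v_side)
  case check_10aeef =>
    -- gif_driver.c:209 the store of `report->slurp_result`: 4 bytes inside the report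
    have hun : ShadowUntouched v.mem s_10aeef.mem := by v_untouched
    exact hrl.accSmall hinv.shadow hun _ 4 (by decide) (by u_omega) (by u_omega)
  case check_10b02a =>
    -- gif_driver.c:211 the store of `report->exit_code = 0`: 4 bytes inside the report
    have hun : ShadowUntouched v.mem s_10b02a.mem := by v_untouched
    exact hrl.accSmall hinv.shadow hun _ 4 (by decide) (by u_omega) (by u_omega)
  case check_10af05 =>
    -- gif_driver.c:213 the store of `report->exit_code = 2`: 4 bytes inside the report
    have hun : ShadowUntouched v.mem s_10af05.mem := by v_untouched
    exact hrl.accSmall hinv.shadow hun _ 4 (by decide) (by u_omega) (by u_omega)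
  · -- 3a. 0x10af14 FROM 0x10b035: DGifSlurp returned GIF_OK (`r14d = 1`); `exit_code = 0`
    -- the four stores since `v`: two check calls' return addresses (stack), two fields of the report
    have hs : Mem.SameExcept
        [⟨(e.reg .rsp).toNat - 992, (e.reg .rsp).toNat - 136⟩,
         ⟨(e.reg .rdx).toNat, (e.reg .rdx).toNat + 64⟩] v.mem s_10af10.mem := by
      rw [w_mem]
      u_same
    have habi : (conv u₀).inv s_10af10 := by
      refine ProgX.Base.abiInv_of ?_ ?_
      · rw [w_flags]
        exact w_df_10b02a
      · rw [w_mxcsr]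
        exact hmx
    have hheld := gd3_held_carry (cut' := Gif.L.gif_decode.chk16) hat w_rip w_rsp (w_kept.get .r12 rfl) (w_kept.get .r13 rfl)
      (w_kept.get .rbx rfl) (w_kept.get .r15 rfl) (w_kept.get .rbp rfl) hs (ProgX.Base.conv_code_in w_eq) habi
    refine ReachVia.done ⟨hheld, ?_⟩
    rw [w_rdi, w_kept.get .rbp rfl]
  · -- 3b. 0x10af14 FROM 0x10af0a: DGifSlurp returned GIF_ERROR; `exit_code = 2`
    -- the four stores since `v`: two check calls' return addresses (stack), two fields of the report
    have hs : Mem.SameExcept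
        [⟨(e.reg .rsp).toNat - 992, (e.reg .rsp).toNat - 136⟩,
         ⟨(e.reg .rdx).toNat, (e.reg .rdx).toNat + 64⟩] v.mem s_10af10.mem := by
      rw [w_mem]
      u_same
    have habi : (conv u₀).inv s_10af10 := by
      refine ProgX.Base.abiInv_of ?_ ?_
      · rw [w_flags]
        exact w_df_10af05
      · rw [w_mxcsr]
        exact hmx
    have hheld := gd3_held_carry (cut' := Gif.L.gif_decode.chk16) hat w_rip w_rsp (w_kept.get .r12 rfl) (w_kept.get .r13 rfl)
      (w_kept.get .rbx rfl) (w_kept.get .r15 rfl) (w_kept.get .rbp rfl) hs (ProgX.Base.conv_code_in w_eq) habi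
    refine ReachVia.done ⟨hheld, ?_⟩
    rw [w_rdi, w_kept.get .rbp rfl]

/-- **10AF14H (chk16) … 10AF77H** (gif_driver.c:215-218): four times a checked 4-byte load inside gif (`gif + 96` Error, `gif + 32`
ImageCount, `gif + 0` SWidth, `gif + 4` SHeight: the live object `(Fc.gif, 120)` of the forest) and the checked store of the value
into the report (`report + 12, 24, 28, 32`: `gif_decode.reportLive`). -/
theorem gd3_seg_fields (Lay : Layout) (hLay : Lay.hi = 0x1000000) (μ : Microarch) (hμ : UserX.MicroOK μ) (u₀ : State)
    (hcode : HasCodeNat Lay u₀ Gif.L.gif_decode.entry Gif.Code.code_gif_decode.nat Gif.L.gif_decode.size)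
    (H : Heap) (rest : List Obj) (frames : List (Nat × FrameLayout)) (Hc : Heap) (Fc : Forest) (e : State) (ret : Word)
    (h_asan_store4_noabort : Asan.SmallCheck Lay μ ProgX.Base.WayInv (ProgX.Base.CodeOK u₀) [.rax, .rcx, .rdx] 4
      ProgX.Base.L.__asan_store4_noabort.entry)
    (h_asan_load4_noabort : Asan.SmallCheck Lay μ ProgX.Base.WayInv (ProgX.Base.CodeOK u₀) [.rax, .rcx, .rdx] 4
      ProgX.Base.L.__asan_load4_noabort.entry)
    (v : State) (hat : gd3_AtChk16 H rest frames Hc Fc u₀ e ret v) :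
    ReachVia Lay μ ProgX.Base.WayInv v (gif_decode.Held Gif.L.gif_decode.at_10af77 H rest frames Hc Fc u₀ e ret) := by
  -- 1. THE PRELUDE
  obtain ⟨hheld, c_rdi0⟩ := hat
  have hcore := hheld.open_.core
  have hinv := hheld.open_.inv
  have hok := hheld.open_.ok
  have hreg := hheld.open_.region
  have hgif := hheld.rbp
  have he := hcore.entry
  v_entry he
  have hpre := hcore.pre
  obtain ⟨hheap, hglob, hconsts0, hin, hrep, hrep_lo, hrep_hi⟩ := hcore.pre
  have w_rip := hcore.rip
  have c_rsp : v.reg .rsp = e.reg .rsp - 136 := hcore.rsp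
  have c_rbx : v.reg .rbx = e.reg .rdx := hcore.rbx
  -- `rbp = gif` as a word over the ghost
  have c_rbp : v.reg .rbp = UInt64.ofNat Fc.gif := Word.eq_ofNat_of_toNat hgif
  have c_rdi : v.reg .rdi = UInt64.ofNat Fc.gif + 0x60 := by
    rw [c_rdi0, c_rbp]
  have w_kept : RegsKept [.rsp] v v := RegsKept.refl _ _
  have w_eq : Mem.EqOn ProgX.Base.L.textLo ProgX.Base.L.textHi u₀.mem v.mem := ProgX.Base.conv_code_eqOn hcore.code
  have hdf := (show abiInv _ from hcore.abi).1
  have hmx := (show abiInv _ from hcore.abi).2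
  have hsse := ProgX.Base.sseOK_of_abiInv hcore.abi
  have hrab := gif_decode.report_above hpre
  have hrl : LiveIn (Hc.liveObjs ++ rest) (gif_decode.framesIn frames e) (e.reg .rdx).toNat 64 :=
    gif_decode.reportLive hpre Hc _ _ _ (Nat.le_refl _) (Nat.le_refl _)
  -- where gif is, one inequality per hypothesis; gif is a live object
  have hbase' : Hc.base = 0x800000 := hreg.1.trans hheap.base
  obtain ⟨wg1, wg2, -⟩ := hok.gif_where hinv.heap hbase'
  have hgl : LiveIn (Hc.liveObjs ++ rest) (gif_decode.framesIn frames e) Fc.gif 120 :=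
    hok.gif_live.liveIn rest _ (Nat.le_refl _) (Nat.le_refl _)
  -- 2. THE WALK
  u_walk hcode [hμ.vendor] until [Gif.L.gif_decode.at_10af77] span [ProgX.Base.L.textLo, ProgX.Base.L.textHi] side (v_side)
  case check_10af14 =>
    -- gif_driver.c:215 the load of `gif->Error`: 4 bytes at gif + 96
    have hun : ShadowUntouched v.mem s_10af14.mem := by v_untouched
    exact hgl.accSmall hinv.shadow hun _ 4 (by decide) (by u_omega) (by u_omega)
  case check_10af21 =>
    -- gif_driver.c:215 the store of `report->gif_error`: 4 bytes at report + 12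
    have hun : ShadowUntouched v.mem s_10af21.mem := by v_untouched
    exact hrl.accSmall hinv.shadow hun _ 4 (by decide) (by u_omega) (by u_omega)
  case check_10af2e =>
    -- gif_driver.c:216 the load of `gif->ImageCount`: 4 bytes at gif + 32
    have hun : ShadowUntouched v.mem s_10af2e.mem := by v_untouched
    exact hgl.accSmall hinv.shadow hun _ 4 (by decide) (by u_omega) (by u_omega)
  case check_10af3b =>
    -- gif_driver.c:216 the store of `report->image_count`: 4 bytes at report + 24
    have hun : ShadowUntouched v.mem s_10af3b.mem := by v_untouched
    exact hrl.accSmall hinv.shadow hun _ 4 (by decide) (by u_omega) (by u_omega)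
  case check_10af47 =>
    -- gif_driver.c:217 the load of `gif->SWidth`: 4 bytes at gif + 0
    have hun : ShadowUntouched v.mem s_10af47.mem := by v_untouched
    exact hgl.accSmall hinv.shadow hun _ 4 (by decide) (by u_omega) (by u_omega)
  case check_10af54 =>
    -- gif_driver.c:217 the store of `report->width`: 4 bytes at report + 28
    have hun : ShadowUntouched v.mem s_10af54.mem := by v_untouched
    exact hrl.accSmall hinv.shadow hun _ 4 (by decide) (by u_omega) (by u_omega)
  case check_10af61 =>
    -- gif_driver.c:218 the load of `gif->SHeight`: 4 bytes at gif + 4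
    have hun : ShadowUntouched v.mem s_10af61.mem := by v_untouched
    exact hgl.accSmall hinv.shadow hun _ 4 (by decide) (by u_omega) (by u_omega)
  case check_10af6e =>
    -- gif_driver.c:218 the store of `report->height`: 4 bytes at report + 32
    have hun : ShadowUntouched v.mem s_10af6e.mem := by v_untouched
    exact hrl.accSmall hinv.shadow hun _ 4 (by decide) (by u_omega) (by u_omega)
  -- 3. 0x10af77: the eight stores since `v`: the check calls' return addresses (stack), four fields of the report
  have hs : Mem.SameExcept
      [⟨(e.reg .rsp).toNat - 992, (e.reg .rsp).toNat - 136⟩,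
       ⟨(e.reg .rdx).toNat, (e.reg .rdx).toNat + 64⟩] v.mem s_10af73.mem := by
    rw [w_mem]
    u_same
  have habi : (conv u₀).inv s_10af73 := by
    refine ProgX.Base.abiInv_of ?_ ?_
    · rw [w_flags]
      exact w_df_10af6e
    · rw [w_mxcsr]
      exact hmx
  have hheld' := gd3_held_carry (cut' := Gif.L.gif_decode.at_10af77) hheld w_rip w_rsp (w_kept.get .r12 rfl)
    (w_kept.get .r13 rfl) (w_kept.get .rbx rfl) (w_kept.get .r15 rfl) (w_kept.get .rbp rfl) hs
    (ProgX.Base.conv_code_in w_eq) habi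
  exact ReachVia.done hheld'

end Gif.Spec.gif_decode_3
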